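-- pv_equiv track=rewrite | github.com/KadaB/wordWrap | wordWrap.py | lineBreak
-- ===== SOURCE A (Python) =====
-- def lineBreak(words, maxL, cache, i):
--
--     # generate possible linesbreaks beginning at word[i:] till length maxL
--     # returns all linebreaks(/sentences) till line is full
--     def getIndicesForWordsInLine(i):
--
--         # count length of line with given set of words (sentence with words + whitespaces)
--         def countLength(wordset):
--             wordLengths = sum(len(word) for word in wordset)
--             return wordLengths + len(wordset) - 1
--
--         for k in range(i, len(words)):
--             line = words[i:k + 1]
--             size = countLength(line)
--
--             if size > maxL and k > i:
--                 break
--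
--             score = maxL - countLength(line)
--             # beginning word, index+1 till line is full, scoring spaces left till maxL square
--             yield i, k + 1, score * score
--
--     # combine scoring, since python can't add tuple...
--     # a score for linebreak-path
--     # b list indices for linebreak-path
--     def combineScoring(a, b):
--         return (a[0] + b[0], a[1] + b[1])
--
--     # save result of recursive call, works itself backwards form recursion terminal,
--     # so guaranteed to hold lowest score from there on
--     def cacheOrRecurse(words, maxL, cache, l):
--             cachedVal = cache.get(l)
--             # return cached value, if none there, recurse
--             return cachedVal if cachedVal else lineBreak(words, maxL, cache, l)
--
--     # actual algorithm, gives set of possible breaks and scores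
--     resultLines = [ combineScoring((score, [ (k, l) ]), cacheOrRecurse(words, maxL, cache, l))
--                    if l < len(words)
--                    else (score, [ (k, l) ])
--
--                    for k, l, score in getIndicesForWordsInLine(i) ]
--
--     # pick lowest score, s = (score, path)
--     result = min(resultLines, key=lambda s: s[0])
--     cache[i] = result
--     return result
-- ===== SOURCE B (Python) =====
-- def lineBreak(words, maxL, cache, i):
--     # Bottom-up DP with prefix sums of word lengths (O(1) line-length query);
--     # return value matches A's; side effect: only cache[i] is written (A also
--     # writes the intermediate entries it recursed into).
--     n = len(words)
--     pre = [0]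
--     for w in words:
--         pre.append(pre[-1] + len(w))
--
--     best = {}
--
--     def bestLine(l):
--         # first-minimal candidate over line breaks starting at word l
--         res = None
--         for k in range(l, n):
--             size = pre[k + 1] - pre[l] + k - l
--             if size > maxL and k > l:
--                 break
--             score = (maxL - size) * (maxL - size)
--             if k + 1 < n:
--                 tail = cache.get(k + 1)
--                 if tail is None:
--                     tail = best[k + 1]
--                 cand = (score + tail[0], [(l, k + 1)] + tail[1])
--             else:
--                 cand = (score, [(l, k + 1)])
--             if res is None or cand[0] < res[0]:
--                 res = cand
--         return res
--
--     l = n - 1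
--     while l > i:
--         if cache.get(l) is None:
--             best[l] = bestLine(l)
--         l -= 1
--     result = bestLine(i)
--     cache[i] = result
--     return result
-- ===== Notes on version B (the rewrite author's own statement) =====
-- stated objective: faster
-- what changed: Replaces A's top-down memoized recursion, which re-slices the word list and re-sums word lengths for every candidate line (twice per candidate), by a bottom-up DP over a prefix-sum array of word lengths, making every line-length query O(1); return value is identical, side effects differ (A fills cache with all intermediate results, B only writes cache[i]).
-- outside the precondition, e.g. on lineBreak(['a', 'b'], 5, {}, -1): A returns (16, [(-1, 2)]), B returns (9, [(-1, 2)])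
import Mathlib
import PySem

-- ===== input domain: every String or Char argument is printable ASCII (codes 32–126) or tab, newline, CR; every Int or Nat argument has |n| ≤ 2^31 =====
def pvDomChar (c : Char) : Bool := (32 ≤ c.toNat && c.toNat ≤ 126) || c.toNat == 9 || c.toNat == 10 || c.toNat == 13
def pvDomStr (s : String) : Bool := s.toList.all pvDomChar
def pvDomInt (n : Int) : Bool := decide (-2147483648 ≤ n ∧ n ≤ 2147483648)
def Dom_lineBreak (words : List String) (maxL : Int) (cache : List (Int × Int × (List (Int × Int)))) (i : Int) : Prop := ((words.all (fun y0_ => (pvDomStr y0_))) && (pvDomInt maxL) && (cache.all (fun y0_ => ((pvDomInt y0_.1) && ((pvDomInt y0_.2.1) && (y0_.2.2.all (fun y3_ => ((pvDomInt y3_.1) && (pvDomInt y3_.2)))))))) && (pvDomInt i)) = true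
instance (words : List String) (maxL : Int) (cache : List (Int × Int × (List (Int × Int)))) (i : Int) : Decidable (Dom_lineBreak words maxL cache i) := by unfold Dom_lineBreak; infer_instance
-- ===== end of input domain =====

-- B replaces A's memoized recursion (which re-sums every candidate line) by a bottom-up DP
-- over prefix sums of word lengths; equivalence is about the RETURN value only (A writes all
-- intermediate results into `cache`, B only writes `cache[i]`).

-- ===== PORT A =====
-- countLength: sum of word lengths plus the separating spaces
def countLengthA (wordset : List String) : Int :=
  (wordset.map PySem.Str.len).sum + PySem.List.len wordset - 1

-- getIndicesForWordsInLine: the generator, as the list of yielded (i, k+1, score*score)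
def genA (words : List String) (maxL i k : Int) : List (Int × Int × Int) :=
  if _h : k < (words.length : Int) then
    let line := PySem.List.slice words (some i) (some (k + 1))
    let size := countLengthA line
    if size > maxL ∧ k > i then []
    else (i, k + 1, (maxL - countLengthA line) * (maxL - countLengthA line)) :: genA words maxL i (k + 1)
  else []
termination_by ((words.length : Int) - k).toNat
decreasing_by omega

-- needed for lineBreak's termination: every yielded second component exceeds the start index
theorem genA_gt (words : List String) (maxL i : Int) : ∀ (k : Int) (e : Int × Int × Int),
    e ∈ genA words maxL i k → k < e.2.1 := by
  intro k
  fun_induction genA words maxL i k with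
  | case1 k hk line size hbr =>
      intro e he; simp at he
  | case2 k hk line size hbr ih =>
      intro e he
      rcases List.mem_cons.mp he with h | h
      · subst h; simp
      · have := ih e h; omega
  | case3 k hk => intro e he; simp at he

def lineBreak (words : List String) (maxL : Int) (cache : List (Int × Int × (List (Int × Int)))) (i : Int) : Int × (List (Int × Int)) :=
  let n : Int := (words.length : Int)
  let resultLines := (genA words maxL i i).attach.map (fun e =>
    let k := e.1.1
    let l := e.1.2.1
    let score := e.1.2.2
    if _h : l < n then
      -- cacheOrRecurse: cached value if present, else the recursive call
      let rest := match (PySem.Dict.mk cache).get? l with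
        | some v => v
        | none => lineBreak words maxL cache l
      (score + rest.1, [(k, l)] ++ rest.2)
    else (score, [(k, l)]))
  -- min(resultLines, key=s[0]); Python raises ValueError on the empty list (i ≥ len(words)),
  -- excluded by Pre_, so the .getD default is never reached on admitted inputs
  (PySem.List.min? resultLines (fun s => s.1)).getD (0, [])
termination_by ((words.length : Int) + 1 - i).toNat
decreasing_by
  have := genA_gt words maxL i i e.1 e.2
  omega

-- ===== PORT B =====
-- pre = [0]; for w in words: pre.append(pre[-1] + len(w))   (running prefix sums)
def preList (acc : Int) : List String → List Int
  | [] => [acc]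
  | w :: ws => acc :: preList (acc + PySem.Str.len w) ws

-- pre[j]; under Pre_ every index Source B uses is in range, so the default is unreachable
def pgetB (pre : List Int) (j : Int) : Int := (PySem.List.pyGet? pre j).getD 0

-- bestLine's loop: scan k = l .. n-1 keeping the first candidate with minimal score
def scanB (maxL n : Int) (pre : List Int) (cache : List (Int × Int × (List (Int × Int))))
    (best : PySem.Dict Int (Int × List (Int × Int))) (l k : Int)
    (res : Option (Int × List (Int × Int))) : Option (Int × List (Int × Int)) :=
  if _h : k < n then
    let size := pgetB pre (k + 1) - pgetB pre l + k - l
    if size > maxL ∧ k > l then res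
    else
      let score := (maxL - size) * (maxL - size)
      let cand :=
        if k + 1 < n then
          let tail :=
            match (PySem.Dict.mk cache).get? (k + 1) with
            | some v => v
            | none => (best.get? (k + 1)).getD (0, [])  -- Source B: best[k+1]; present under Pre_
          (score + tail.1, (l, k + 1) :: tail.2)
        else (score, [(l, k + 1)])
      let res' :=
        match res with
        | none => some cand
        | some r => if cand.1 < r.1 then some cand else some r
      scanB maxL n pre cache best l (k + 1) res'
  else res
termination_by (n - k).toNat
decreasing_by omega

-- the while loop: l = n-1 .. i+1, filling best[l] for indices not already in cache
def fillB (maxL n : Int) (pre : List Int) (cache : List (Int × Int × (List (Int × Int))))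
    (i l : Int) (best : PySem.Dict Int (Int × List (Int × Int))) :
    PySem.Dict Int (Int × List (Int × Int)) :=
  if _h : l > i then
    let best' :=
      if ((PySem.Dict.mk cache).get? l).isSome then best
      else best.insert l ((scanB maxL n pre cache best l l none).getD (0, []))
    fillB maxL n pre cache i (l - 1) best'
  else best
termination_by (l - i).toNat
decreasing_by omega

def lineBreak_alt (words : List String) (maxL : Int) (cache : List (Int × Int × (List (Int × Int)))) (i : Int) : Int × (List (Int × Int)) :=
  let n : Int := (words.length : Int)
  let pre := preList 0 words
  let best := fillB maxL n pre cache i (n - 1) PySem.Dict.empty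
  -- result = bestLine(i); Source B then writes cache[i] (mutation; return value only here)
  (scanB maxL n pre cache best i i none).getD (0, [])

-- ===== PRECONDITION & SPEC =====
-- Pre_ excludes i ≥ len(words) (A raises ValueError: min() of an empty sequence), i < 0
-- (outside the natural domain: A's value there is an accident of negative-slice wraparound),
-- and association lists with duplicate keys (no canonical Python-dict reading).
def Pre_lineBreak (words : List String) (maxL : Int) (cache : List (Int × Int × (List (Int × Int)))) (i : Int) : Prop :=
  0 ≤ i ∧ i < (words.length : Int) ∧ (cache.map Prod.fst).Nodup
instance (words : List String) (maxL : Int) (cache : List (Int × Int × (List (Int × Int)))) (i : Int) : Decidable (Pre_lineBreak words maxL cache i) := by unfold Pre_lineBreak; infer_instance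

def pvWitness_lineBreak : List String × Int × (List (Int × Int × (List (Int × Int)))) × Int :=
  (["a", "bb"], 5, [(1, (7, [(3, 4)]))], 0)

def Spec_lineBreak (words : List String) (maxL : Int) (cache : List (Int × Int × (List (Int × Int)))) (i : Int) (out : Int × (List (Int × Int))) : Prop := out = lineBreak_alt words maxL cache i
instance (words : List String) (maxL : Int) (cache : List (Int × Int × (List (Int × Int)))) (i : Int) (out : Int × (List (Int × Int))) : Decidable (Spec_lineBreak words maxL cache i out) := by unfold Spec_lineBreak; infer_instance

-- ===== CLAIM (what is proved, stated in full; the proofs are below) =====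
def Claim_equal_lineBreak : Prop := ∀ (words : List String) (maxL : Int) (cache : List (Int × Int × (List (Int × Int)))) (i : Int), Dom_lineBreak words maxL cache i → Pre_lineBreak words maxL cache i → Spec_lineBreak words maxL cache i (lineBreak words maxL cache i)

-- ===== LEMMAS AND PROOFS =====

-- A's candidate value for one yielded triple (k, l, score)
def candA (words : List String) (maxL : Int) (cache : List (Int × Int × (List (Int × Int))))
    (e : Int × Int × Int) : Int × List (Int × Int) :=
  if e.2.1 < (words.length : Int) then
    let rest := match (PySem.Dict.mk cache).get? e.2.1 with
      | some v => v
      | none => lineBreak words maxL cache e.2.1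
    (e.2.2 + rest.1, [(e.1, e.2.1)] ++ rest.2)
  else (e.2.2, [(e.1, e.2.1)])

-- B's running-minimum step (the body of `if res is None or cand[0] < res[0]`)
def minStep (r : Option (Int × List (Int × Int))) (c : Int × List (Int × Int)) :
    Option (Int × List (Int × Int)) :=
  match r with
  | none => some c
  | some m => if c.1 < m.1 then some c else some m

theorem lineBreak_char (words : List String) (maxL : Int) (cache : List (Int × Int × (List (Int × Int)))) (i : Int) :
    lineBreak words maxL cache i
      = (PySem.List.min? ((genA words maxL i i).map (candA words maxL cache)) (fun s => s.1)).getD (0, []) := by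
  conv_lhs => rw [lineBreak]
  simp only []
  congr 1
  congr 1
  have hmap : ∀ (F : Int × Int × Int → Int × List (Int × Int)),
      (genA words maxL i i).attach.map (fun e => F e.1) = (genA words maxL i i).map F := by
    intro F; rw [List.attach_map_val]
  refine Eq.trans (hmap (fun x =>
    if _h : x.2.1 < (words.length : Int) then
      ((x.2.2) + (match (PySem.Dict.mk cache).get? x.2.1 with
        | some v => v
        | none => lineBreak words maxL cache x.2.1).1,
       [(x.1, x.2.1)] ++ (match (PySem.Dict.mk cache).get? x.2.1 with
        | some v => v
        | none => lineBreak words maxL cache x.2.1).2)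
    else (x.2.2, [(x.1, x.2.1)]))) ?_
  refine List.map_congr_left ?_
  intro e _
  simp only [candA]
  split
  · rfl
  · rfl

theorem preList_get (words : List String) (acc : Int) (j : Nat) (h : j ≤ words.length) :
    (preList acc words)[j]? = some (acc + ((words.take j).map PySem.Str.len).sum) := by
  induction words generalizing acc j with
  | nil =>
      simp only [List.length_nil, Nat.le_zero] at h
      subst h
      simp [preList]
  | cons w ws ih =>
      cases j with
      | zero => simp [preList]
      | succ j' =>
          simp only [preList, List.getElem?_cons_succ, List.take_succ_cons, List.map_cons,
            List.sum_cons]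
          rw [ih (acc + PySem.Str.len w) j' (by simpa using h)]
          ring_nf

theorem size_eq (words : List String) (l k : Int) (h0 : 0 ≤ l) (hlk : l ≤ k)
    (hk : k < (words.length : Int)) :
    countLengthA (PySem.List.slice words (some l) (some (k + 1)))
      = pgetB (preList 0 words) (k + 1) - pgetB (preList 0 words) l + k - l := by
  lift l to ℕ using h0 with a
  lift k to ℕ using (by omega) with b
  have hb : b < words.length := by exact_mod_cast hk
  have hab : a ≤ b := by exact_mod_cast hlk
  have h1 : ((b : Int) + 1) = ((b + 1 : ℕ) : Int) := by push_cast; ring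
  rw [h1, PySem.List.slice_natCast]
  unfold pgetB
  rw [PySem.List.pyGet?_natCast, PySem.List.pyGet?_natCast,
    preList_get words 0 (b + 1) (by omega), preList_get words 0 a (by omega),
    Option.getD_some, Option.getD_some]
  have hsplit : words.take (b + 1) = words.take a ++ (words.drop a).take (b + 1 - a) := by
    have : b + 1 = a + (b + 1 - a) := by omega
    rw [this, List.take_add, Nat.add_sub_cancel_left]
  rw [hsplit, List.map_append, List.sum_append]
  unfold countLengthA
  rw [PySem.List.len_eq]
  have hlen : ((words.drop a).take (b + 1 - a)).length = b + 1 - a := by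
    simp [List.length_take, List.length_drop]
    omega
  rw [hlen]
  omega

-- the invariant carried down the fill loop
def InvB (words : List String) (maxL : Int) (cache : List (Int × Int × (List (Int × Int))))
    (best : PySem.Dict Int (Int × List (Int × Int))) (l : Int) : Prop :=
  ∀ m : Int, l < m → m < (words.length : Int) → (PySem.Dict.mk cache).get? m = none →
    best.get? m = some (lineBreak words maxL cache m)

theorem scan_eq (words : List String) (maxL : Int) (cache : List (Int × Int × (List (Int × Int))))
    (best : PySem.Dict Int (Int × List (Int × Int))) (l : Int) (h0 : 0 ≤ l)
    (hInv : InvB words maxL cache best l) :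
    ∀ (k : Int) (res : Option (Int × List (Int × Int))), l ≤ k →
      scanB maxL (words.length : Int) (preList 0 words) cache best l k res
        = ((genA words maxL l k).map (candA words maxL cache)).foldl minStep res := by
  have main : ∀ (fuel : Nat) (k : Int) (res : Option (Int × List (Int × Int))), l ≤ k →
      ((words.length : Int) - k).toNat ≤ fuel →
      scanB maxL (words.length : Int) (preList 0 words) cache best l k res
        = ((genA words maxL l k).map (candA words maxL cache)).foldl minStep res := by
    intro fuel
    induction fuel with
    | zero =>
        intro k res hlk hf
        rw [scanB, genA, dif_neg (by omega), dif_neg (by omega)]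
        simp
    | succ f ih =>
        intro k res hlk hf
        by_cases hk : k < (words.length : Int)
        · rw [scanB, genA, dif_pos hk, dif_pos hk]
          simp only []
          rw [size_eq words l k h0 hlk hk]
          split_ifs with hbr hk1
          · simp
          · rw [List.map_cons, List.foldl_cons]
            rcases hc : (PySem.Dict.mk cache).get? (k + 1) with _ | v
            · have hb := hInv (k + 1) (by omega) hk1 hc
              simp only [hc, hb, Option.getD_some, candA, if_pos hk1, minStep,
                List.singleton_append]
              exact ih (k + 1) _ (by omega) (by omega)
            · simp only [hc, candA, if_pos hk1, minStep, List.singleton_append]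
              exact ih (k + 1) _ (by omega) (by omega)
          · rw [List.map_cons, List.foldl_cons]
            simp only [candA, if_neg hk1, minStep]
            exact ih (k + 1) _ (by omega) (by omega)
        · rw [scanB, genA, dif_neg hk, dif_neg hk]
          simp
  intro k res hlk
  exact main ((words.length : Int) - k).toNat k res hlk le_rfl

theorem bestLine_eq (words : List String) (maxL : Int) (cache : List (Int × Int × (List (Int × Int))))
    (best : PySem.Dict Int (Int × List (Int × Int))) (l : Int) (h0 : 0 ≤ l)
    (hln : l < (words.length : Int)) (hInv : InvB words maxL cache best l) :
    scanB maxL (words.length : Int) (preList 0 words) cache best l l none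
      = some (lineBreak words maxL cache l) := by
  rw [scan_eq words maxL cache best l h0 hInv l none le_rfl]
  have hfold : ∀ (xs : List (Int × List (Int × Int))),
      xs.foldl minStep none = PySem.List.min? xs (fun s => s.1) := by
    intro xs
    rw [PySem.List.min?]
    congr 1
    funext r c
    rw [minStep.eq_def]
    rcases r with _ | m <;> rfl
  rw [hfold, lineBreak_char]
  have hne : genA words maxL l l ≠ [] := by
    rw [genA, dif_pos hln]
    simp only []
    split_ifs with h
    · omega
    · simp
  rcases hm : PySem.List.min? ((genA words maxL l l).map (candA words maxL cache)) (fun s => s.1) with _ | m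
  · rw [PySem.List.min?_eq_none_iff, List.map_eq_nil_iff] at hm
    exact absurd hm hne
  · rw [Option.getD_some]

theorem fill_inv (words : List String) (maxL : Int) (cache : List (Int × Int × (List (Int × Int))))
    (i : Int) (h0i : 0 ≤ i) :
    ∀ (l : Int) (best : PySem.Dict Int (Int × List (Int × Int))), l < (words.length : Int) →
      InvB words maxL cache best l →
      InvB words maxL cache (fillB maxL (words.length : Int) (preList 0 words) cache i l best) i := by
  have main : ∀ (fuel : Nat) (l : Int) (best : PySem.Dict Int (Int × List (Int × Int))),
      (l - i).toNat ≤ fuel → l < (words.length : Int) → InvB words maxL cache best l →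
      InvB words maxL cache (fillB maxL (words.length : Int) (preList 0 words) cache i l best) i := by
    intro fuel
    induction fuel with
    | zero =>
        intro l best hf hln hInv
        rw [fillB, dif_neg (by omega)]
        intro m hm hmn hc
        exact hInv m (by omega) hmn hc
    | succ f ih =>
        intro l best hf hln hInv
        by_cases hli : l > i
        · rw [fillB, dif_pos hli]
          simp only []
          apply ih (l - 1) _ (by omega) (by omega)
          intro m hm hmn hc
          by_cases hml : m = l
          · subst hml
            rw [if_neg (by simp [hc]), PySem.Dict.get?_insert, if_pos rfl,
              bestLine_eq words maxL cache best m (by omega) hln hInv, Option.getD_some]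
          · by_cases hcs : ((PySem.Dict.mk cache).get? l).isSome
            · rw [if_pos hcs]
              exact hInv m (by omega) hmn hc
            · rw [if_neg hcs, PySem.Dict.get?_insert, if_neg hml]
              exact hInv m (by omega) hmn hc
        · rw [fillB, dif_neg hli]
          intro m hm hmn hc
          exact hInv m (by omega) hmn hc
  intro l best hln hInv
  exact main (l - i).toNat l best le_rfl hln hInv

-- ===== VERDICT (by name: the statement is the Claim_ definition above) =====
theorem lineBreak_spec : Claim_equal_lineBreak := by
  intro words maxL cache i _hDom hPre
  obtain ⟨h0, hn, _⟩ := hPre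
  unfold Spec_lineBreak lineBreak_alt
  have hinv0 : InvB words maxL cache PySem.Dict.empty ((words.length : Int) - 1) := by
    intro m hm hmn _; omega
  have hinv := fill_inv words maxL cache i h0 ((words.length : Int) - 1) PySem.Dict.empty
    (by omega) hinv0
  have := bestLine_eq words maxL cache _ i h0 hn hinv
  simp only [this, Option.getD_some]
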